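-- pv_equiv track=rewrite | github.com/dialogbox/adventofcode | py/day22part2.py | is_fully_contained
-- ===== SOURCE A (Python) =====
-- from itertools import product
--
-- def is_fully_contained(c1, c2):
--     (x1, y1, z1) = c1
--     (x2, y2, z2) = c2
--
--     points2 = list(product([x2[0], x2[1]], [y2[0], y2[1]], [z2[0], z2[1]]))
--
--     for (x, y, z) in points2:
--         if not (
--             x1[0] <= x
--             and x1[1] >= x
--             and y1[0] <= y
--             and y1[1] >= y
--             and z1[0] <= z
--             and z1[1] >= z
--         ):
--             return False
--     return True
-- ===== SOURCE B (Python) =====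
-- def is_fully_contained(c1, c2):
--     return all(c1[i][0] <= v and v <= c1[i][1] for i in range(3) for v in c2[i])
-- ===== Notes on version B (the rewrite author's own statement) =====
-- stated objective: simpler
-- what changed: Replaces the enumeration of all 8 corner vertices via itertools.product with a direct per-axis interval-containment check of both endpoints of each of c2's intervals (6 comparisons pairs instead of 8x6 vertex tests).
import Mathlib
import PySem

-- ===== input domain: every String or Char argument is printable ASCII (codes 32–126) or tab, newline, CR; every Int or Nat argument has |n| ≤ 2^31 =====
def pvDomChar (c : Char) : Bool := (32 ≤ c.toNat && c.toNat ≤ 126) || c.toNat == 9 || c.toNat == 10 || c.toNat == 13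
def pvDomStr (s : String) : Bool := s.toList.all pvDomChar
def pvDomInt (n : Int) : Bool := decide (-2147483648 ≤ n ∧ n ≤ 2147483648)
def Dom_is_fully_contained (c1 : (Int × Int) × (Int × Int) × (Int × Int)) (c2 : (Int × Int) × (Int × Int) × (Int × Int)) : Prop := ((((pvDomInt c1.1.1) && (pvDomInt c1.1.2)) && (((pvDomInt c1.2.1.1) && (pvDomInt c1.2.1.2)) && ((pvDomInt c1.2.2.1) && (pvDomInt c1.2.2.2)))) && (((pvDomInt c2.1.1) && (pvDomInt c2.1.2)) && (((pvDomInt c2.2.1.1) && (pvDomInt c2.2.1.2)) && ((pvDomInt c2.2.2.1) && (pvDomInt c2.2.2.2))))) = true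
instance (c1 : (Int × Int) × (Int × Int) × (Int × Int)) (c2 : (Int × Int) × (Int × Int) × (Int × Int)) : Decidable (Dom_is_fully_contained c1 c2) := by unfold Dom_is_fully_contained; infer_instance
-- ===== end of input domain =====

-- B replaces the 8-corner enumeration with a direct per-axis check of both interval endpoints (simpler).


-- ===== PORT A =====
def ifcCheck (x1 y1 z1 : Int × Int) (p : Int × Int × Int) : Bool :=
  decide (x1.1 ≤ p.1) && decide (x1.2 ≥ p.1) && decide (y1.1 ≤ p.2.1) && decide (y1.2 ≥ p.2.1)
    && decide (z1.1 ≤ p.2.2) && decide (z1.2 ≥ p.2.2)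

def ifcLoop (x1 y1 z1 : Int × Int) : List (Int × Int × Int) → Bool
  | [] => true
  | p :: rest => if !(ifcCheck x1 y1 z1 p) then false else ifcLoop x1 y1 z1 rest

def is_fully_contained (c1 : (Int × Int) × (Int × Int) × (Int × Int)) (c2 : (Int × Int) × (Int × Int) × (Int × Int)) : Bool :=
  let x1 := c1.1; let y1 := c1.2.1; let z1 := c1.2.2
  let x2 := c2.1; let y2 := c2.2.1; let z2 := c2.2.2
  let points2 : List (Int × Int × Int) :=
    [(x2.1, y2.1, z2.1), (x2.1, y2.1, z2.2), (x2.1, y2.2, z2.1), (x2.1, y2.2, z2.2),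
     (x2.2, y2.1, z2.1), (x2.2, y2.1, z2.2), (x2.2, y2.2, z2.1), (x2.2, y2.2, z2.2)]
  ifcLoop x1 y1 z1 points2

-- ===== PORT B =====
def is_fully_contained_alt (c1 : (Int × Int) × (Int × Int) × (Int × Int)) (c2 : (Int × Int) × (Int × Int) × (Int × Int)) : Bool :=
  -- all(c1[i][0] <= v and v <= c1[i][1] for i in range(3) for v in c2[i])
  ([( c1.1, c2.1 ), ( c1.2.1, c2.2.1 ), ( c1.2.2, c2.2.2 )] : List ((Int × Int) × (Int × Int))).all
    (fun ab => [ab.2.1, ab.2.2].all (fun v => decide (ab.1.1 ≤ v) && decide (v ≤ ab.1.2)))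

-- ===== PRECONDITION & SPEC =====
def Spec_is_fully_contained (c1 : (Int × Int) × (Int × Int) × (Int × Int)) (c2 : (Int × Int) × (Int × Int) × (Int × Int)) (out : Bool) : Prop := out = is_fully_contained_alt c1 c2
instance (c1 : (Int × Int) × (Int × Int) × (Int × Int)) (c2 : (Int × Int) × (Int × Int) × (Int × Int)) (out : Bool) : Decidable (Spec_is_fully_contained c1 c2 out) := by unfold Spec_is_fully_contained; infer_instance

-- ===== CLAIM (what is proved, stated in full; the proofs are below) =====
def Claim_equal_is_fully_contained : Prop := ∀ (c1 : (Int × Int) × (Int × Int) × (Int × Int)) (c2 : (Int × Int) × (Int × Int) × (Int × Int)), Dom_is_fully_contained c1 c2 → Spec_is_fully_contained c1 c2 (is_fully_contained c1 c2)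

-- ===== LEMMAS AND PROOFS =====

-- ===== VERDICT (by name: the statement is the Claim_ definition above) =====
theorem is_fully_contained_spec : Claim_equal_is_fully_contained := by
  intro c1 c2 _
  obtain ⟨⟨a, b⟩, ⟨c, d⟩, e, f⟩ := c1
  obtain ⟨⟨g, h⟩, ⟨i, j⟩, k, l⟩ := c2
  unfold Spec_is_fully_contained
  rw [Bool.eq_iff_iff]
  simp [is_fully_contained, is_fully_contained_alt, ifcLoop, ifcCheck]
  omega
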